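-- pv_equiv track=rewrite | github.com/murilocapozzi/leetcode | leetcode-75/array-string/1768/Solution.py | mergeAlternately
-- ===== SOURCE A (Python) =====
-- def mergeAlternately(word1: str, word2: str) -> str:
--
--     output = ''
--
--     i = 0
--     j = 0
--     while i < len(word1) or j < len(word2):
--
--         if i < len(word1):
--             output += word1[i]
--             i += 1
--
--         if j < len(word2):
--             output += word2[j]
--             j += 1
--
--     return output
-- ===== SOURCE B (Python) =====
-- def mergeAlternately(word1: str, word2: str) -> str:
--     n = min(len(word1), len(word2))
--     return ''.join(a + b for a, b in zip(word1, word2)) + word1[n:] + word2[n:]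
-- ===== Notes on version B (the rewrite author's own statement) =====
-- stated objective: idiomatic
-- what changed: Replaces the merged while loop with per-character length guards (building the result by repeated string +=) by a zip pass over character pairs joined once, plus a single tail-slice append of the longer word's leftover.
import Mathlib
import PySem

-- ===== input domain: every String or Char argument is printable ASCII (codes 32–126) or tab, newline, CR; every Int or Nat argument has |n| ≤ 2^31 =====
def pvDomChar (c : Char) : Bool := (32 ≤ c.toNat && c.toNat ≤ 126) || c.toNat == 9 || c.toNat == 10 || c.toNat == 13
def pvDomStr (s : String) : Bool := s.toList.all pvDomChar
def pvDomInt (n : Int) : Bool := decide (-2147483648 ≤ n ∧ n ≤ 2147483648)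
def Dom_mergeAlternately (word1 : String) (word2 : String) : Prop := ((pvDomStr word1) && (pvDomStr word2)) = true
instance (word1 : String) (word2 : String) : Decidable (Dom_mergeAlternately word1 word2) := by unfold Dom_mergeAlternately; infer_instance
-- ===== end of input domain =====

-- B: idiomatic zip-pairs + tail-slices with one join, replacing A's guarded while loop of repeated string +=; a timing run measured B faster.

-- ===== PORT A =====
-- A's while loop over indices i, j with two independent 'if index in range' guards,
-- transcribed as structural recursion on the remaining suffixes of the two words.
def mergeAltLoopA : List Char → List Char → List Char
  | [], [] => []                              -- loop condition false: return accumulated output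
  | a :: as, b :: bs => a :: b :: mergeAltLoopA as bs   -- both guards fire
  | a :: as, [] => a :: mergeAltLoopA as []             -- only i < len(word1)
  | [], b :: bs => b :: mergeAltLoopA [] bs             -- only j < len(word2)

def mergeAlternately (word1 : String) (word2 : String) : String :=
  String.mk (mergeAltLoopA word1.toList word2.toList)

-- ===== PORT B =====
def mergeAlternately_alt (word1 : String) (word2 : String) : String :=
  let n := min word1.toList.length word2.toList.length
  String.mk (((word1.toList.zip word2.toList).flatMap (fun p => [p.1, p.2]))
    ++ word1.toList.drop n ++ word2.toList.drop n)

-- ===== PRECONDITION & SPEC =====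
def Spec_mergeAlternately (word1 : String) (word2 : String) (out : String) : Prop := out = mergeAlternately_alt word1 word2
instance (word1 : String) (word2 : String) (out : String) : Decidable (Spec_mergeAlternately word1 word2 out) := by unfold Spec_mergeAlternately; infer_instance

-- ===== CLAIM (what is proved, stated in full; the proofs are below) =====
def Claim_equal_mergeAlternately : Prop := ∀ (word1 : String) (word2 : String), Dom_mergeAlternately word1 word2 → Spec_mergeAlternately word1 word2 (mergeAlternately word1 word2)

-- ===== LEMMAS AND PROOFS =====
theorem mergeAltLoopA_nil_left (w : List Char) : mergeAltLoopA [] w = w := by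
  induction w with
  | nil => simp [mergeAltLoopA]
  | cons b bs ih => simp [mergeAltLoopA, ih]

theorem mergeAltLoopA_nil_right (w : List Char) : mergeAltLoopA w [] = w := by
  induction w with
  | nil => simp [mergeAltLoopA]
  | cons a as ih => simp [mergeAltLoopA, ih]

theorem mergeAltLoopA_eq (w1 w2 : List Char) :
    mergeAltLoopA w1 w2 =
      ((w1.zip w2).flatMap (fun p => [p.1, p.2]))
        ++ w1.drop (min w1.length w2.length) ++ w2.drop (min w1.length w2.length) := by
  induction w1 generalizing w2 with
  | nil => simp [mergeAltLoopA_nil_left]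
  | cons a as ih =>
    cases w2 with
    | nil => simp [mergeAltLoopA_nil_right]
    | cons b bs =>
      simp [mergeAltLoopA, ih bs, Nat.succ_min_succ]

-- ===== VERDICT (by name: the statement is the Claim_ definition above) =====
theorem mergeAlternately_spec : Claim_equal_mergeAlternately := by
  intro w1 w2 _
  unfold Spec_mergeAlternately mergeAlternately mergeAlternately_alt
  rw [mergeAltLoopA_eq]
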